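-- pv_equiv track=rewrite | github.com/manitou48/pyboard | htu21d.py | crc8check
-- ===== SOURCE A (Python) =====
-- def crc8check(value):
-- 	#Calulate the CRC8 for the data received
-- 	# from https://github.com/sparkfun/HTU21D_Breakout
-- 	remainder = ( ( value[0] << 8 ) + value[1] ) << 8
-- 	remainder |= value[2]
--
-- 	# POLYNOMIAL = 0x0131 = x^8 + x^5 + x^4 + 1
-- 	# divsor = 0x988000 is polynomial shifted to farthest left of three bytes
-- 	divsor = 0x988000
--
-- 	for i in range(0, 16):
-- 		if( remainder & 1 << (23 - i) ):
-- 			remainder ^= divsor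
--
-- 		divsor = divsor >> 1
--
-- 	if remainder == 0:
-- 		return True
-- 	else:
-- 		return False
-- ===== SOURCE B (Python) =====
-- # Table-driven CRC-8 (poly 0x131): one 256-entry table, two masked byte reductions
-- # instead of A's 16-iteration bit-by-bit division loop.
--
-- def _make_table():
--     # classic 8-bit CRC register table for polynomial x^8+x^5+x^4+1 (0x31 below x^8)
--     table = []
--     for b in range(256):
--         crc = b
--         for _ in range(8):
--             if crc & 0x80:
--                 crc = ((crc << 1) ^ 0x31) & 0xFF
--             else:
--                 crc = (crc << 1) & 0xFF
--         # XOR mask that clears byte b at bits 23..16 and injects the remainder at bits 15..8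
--         table.append((b << 16) ^ (crc << 8))
--     return table
--
-- _TABLE = _make_table()
--
-- def crc8check(value):
--     remainder = ((value[0] << 8) + value[1]) << 8
--     remainder |= value[2]
--     remainder ^= _TABLE[(remainder >> 16) & 0xFF]
--     remainder ^= _TABLE[(remainder >> 8) & 0xFF] >> 8
--     return remainder == 0
-- ===== Notes on version B (the rewrite author's own statement) =====
-- stated objective: alternative
-- what changed: Replaced A's 16-iteration bit-by-bit CRC division loop with a precomputed 256-entry CRC-8 table (poly 0x31) applied twice to masked bytes of the remainder.
import Mathlib
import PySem

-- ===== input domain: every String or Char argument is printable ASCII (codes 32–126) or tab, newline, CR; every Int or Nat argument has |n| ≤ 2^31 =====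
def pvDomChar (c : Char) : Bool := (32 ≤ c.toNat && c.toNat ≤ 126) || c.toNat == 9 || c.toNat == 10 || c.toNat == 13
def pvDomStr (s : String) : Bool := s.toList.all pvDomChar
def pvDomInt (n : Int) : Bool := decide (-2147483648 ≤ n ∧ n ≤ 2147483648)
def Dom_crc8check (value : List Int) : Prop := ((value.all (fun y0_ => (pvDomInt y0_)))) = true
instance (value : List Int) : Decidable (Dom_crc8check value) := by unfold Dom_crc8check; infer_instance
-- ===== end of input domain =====

-- B replaces A's 16-iteration bit-by-bit CRC division loop by a precomputed 256-entry
-- CRC table applied twice to masked bytes of the remainder (a different, table-driven algorithm).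

-- ===== PORT A =====
-- value[0], value[1], value[2]: Pre_ guarantees length ≥ 3, so pyGet? is some and the .getD 0 default is never taken.
-- range(0,16) is ported as List.range 16; '23 - i' as Nat subtraction is exact since i < 16.
def crc8check (value : List Int) : Bool :=
  let v0 := (PySem.List.pyGet? value 0).getD 0
  let v1 := (PySem.List.pyGet? value 1).getD 0
  let v2 := (PySem.List.pyGet? value 2).getD 0
  let remainder : Int := PySem.Int.bor (((v0 <<< (8 : Nat)) + v1) <<< (8 : Nat)) v2
  let s := (List.range 16).foldl
      (fun (s : Int × Int) (i : Nat) =>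
        (if PySem.Int.band s.1 ((1 : Int) <<< (23 - i)) ≠ 0 then PySem.Int.bxor s.1 s.2 else s.1,
         s.2 >>> (1 : Nat)))
      (remainder, (0x988000 : Int))
  if s.1 = 0 then true else false

-- ===== PORT B =====
-- transliteration of Source B: a classic 8-bit CRC register table for polynomial 0x31 (below x^8),
-- stored as the 24-bit XOR mask (b<<16) ^ (crc<<8); then two masked byte reductions.
def crcByteStepB (c : Nat) : Nat :=
  if c &&& 0x80 ≠ 0 then ((c <<< 1) ^^^ 0x31) &&& 0xFF else (c <<< 1) &&& 0xFF

def mkEntryB (b : Nat) : Nat :=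
  (b <<< 16) ^^^ (((List.range 8).foldl (fun c _ => crcByteStepB c) b) <<< 8)

def tableB : List Nat := (List.range 256).map mkEntryB

-- Python's table index (remainder >> k) & 0xFF is always a nonnegative int, so .toNat is exact.
def crc8check_alt (value : List Int) : Bool :=
  let v0 := (PySem.List.pyGet? value 0).getD 0
  let v1 := (PySem.List.pyGet? value 1).getD 0
  let v2 := (PySem.List.pyGet? value 2).getD 0
  let remainder : Int := PySem.Int.bor (((v0 <<< (8 : Nat)) + v1) <<< (8 : Nat)) v2
  let r1 : Int := PySem.Int.bxor remainder
      (Int.ofNat (tableB.getD (PySem.Int.band (remainder >>> (16 : Nat)) 255).toNat 0))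
  let r2 : Int := PySem.Int.bxor r1
      (Int.ofNat (tableB.getD (PySem.Int.band (r1 >>> (8 : Nat)) 255).toNat 0 >>> 8))
  r2 == 0

-- ===== PRECONDITION & SPEC =====
-- Python A raises IndexError when len(value) < 3; those inputs are excluded.
def Pre_crc8check (value : List Int) : Prop := 3 ≤ value.length
instance (value : List Int) : Decidable (Pre_crc8check value) := by unfold Pre_crc8check; infer_instance

def pvWitness_crc8check : List Int := ([0, 0, 0])

def Spec_crc8check (value : List Int) (out : Bool) : Prop := out = crc8check_alt value
instance (value : List Int) (out : Bool) : Decidable (Spec_crc8check value out) := by unfold Spec_crc8check; infer_instance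

-- ===== CLAIM (what is proved, stated in full; the proofs are below) =====
def Claim_equal_crc8check : Prop := ∀ (value : List Int), Dom_crc8check value → Pre_crc8check value → Spec_crc8check value (crc8check value)

-- ===== LEMMAS AND PROOFS =====

-- A's loop, abstracted over Nat: one conditional-XOR division step and a chain of them.
def nstep (d k x : Nat) : Nat := if x &&& (1 <<< k) ≠ 0 then x ^^^ d else x

def nchain (ps : List (Nat × Nat)) (x : Nat) : Nat := ps.foldl (fun x p => nstep p.1 p.2 x) x

-- the (divisor, bit) schedule of A's 16 steps, split into its two byte stages
def ps1 : List (Nat × Nat) :=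
  [(0x988000, 23), (0x4C4000, 22), (0x262000, 21), (0x131000, 20),
   (0x98800, 19), (0x4C400, 18), (0x26200, 17), (0x13100, 16)]

def ps2 : List (Nat × Nat) :=
  [(0x9880, 15), (0x4C40, 14), (0x2620, 13), (0x1310, 12),
   (0x988, 11), (0x4C4, 10), (0x262, 9), (0x131, 8)]

def mkPairs : List Nat → Nat → List (Nat × Nat)
  | [], _ => []
  | i :: t, d => (d, 23 - i) :: mkPairs t (d >>> 1)

lemma and_pow_ne (x k : Nat) : (x &&& (1 <<< k) ≠ 0) ↔ x.testBit k = true := by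
  rw [Nat.one_shiftLeft]
  constructor
  · intro h
    by_contra hb
    simp only [Bool.not_eq_true] at hb
    apply h
    apply Nat.eq_of_testBit_eq
    intro i
    rw [Nat.testBit_and, Nat.testBit_two_pow, Nat.zero_testBit]
    by_cases hik : k = i
    · subst hik; simp [hb]
    · simp [hik]
  · intro h hz
    have := congrArg (fun n => n.testBit k) hz
    simp only [Nat.testBit_and, Nat.testBit_two_pow, Nat.zero_testBit, h] at this
    simp at this

lemma xor_shuffle (x y d C : Nat) : (x ^^^ d) ^^^ ((y ^^^ d) ^^^ C) = x ^^^ (y ^^^ C) := by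
  apply Nat.eq_of_testBit_eq
  intro i
  simp only [Nat.testBit_xor]
  cases x.testBit i <;> cases y.testBit i <;> cases d.testBit i <;> cases C.testBit i <;> rfl

-- two runs of the chain whose states agree on every decision bit apply the same XOR masks
lemma nchain_congr : ∀ (ps : List (Nat × Nat)) (x y : Nat),
    (∀ p ∈ ps, x.testBit p.2 = y.testBit p.2) →
    nchain ps x = x ^^^ (y ^^^ nchain ps y) ∧
      ∀ k, x.testBit k = y.testBit k → (nchain ps x).testBit k = (nchain ps y).testBit k := by
  intro ps
  induction ps with
  | nil =>
    intro x y h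
    refine ⟨by simp [nchain], fun k hk => by simpa [nchain] using hk⟩
  | cons p t ih =>
    intro x y h
    obtain ⟨d, k0⟩ := p
    have hk0 : x.testBit k0 = y.testBit k0 := h (d, k0) (by simp)
    have hcond : (x &&& (1 <<< k0) ≠ 0) ↔ (y &&& (1 <<< k0) ≠ 0) := by
      rw [and_pow_ne, and_pow_ne, hk0]
    have hstep : ∀ k, x.testBit k = y.testBit k →
        (nstep d k0 x).testBit k = (nstep d k0 y).testBit k := by
      intro k hk
      unfold nstep
      by_cases hc : x &&& (1 <<< k0) ≠ 0
      · rw [if_pos hc, if_pos (hcond.mp hc), Nat.testBit_xor, Nat.testBit_xor, hk]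
      · rw [if_neg hc, if_neg (fun hy => hc (hcond.mpr hy))]; exact hk
    have ht : ∀ p ∈ t, (nstep d k0 x).testBit p.2 = (nstep d k0 y).testBit p.2 :=
      fun p hp => hstep p.2 (h p (List.mem_cons_of_mem _ hp))
    obtain ⟨ih1, ih2⟩ := ih (nstep d k0 x) (nstep d k0 y) ht
    constructor
    · have e1 : nchain ((d, k0) :: t) x = nchain t (nstep d k0 x) := rfl
      have e2 : nchain ((d, k0) :: t) y = nchain t (nstep d k0 y) := rfl
      rw [e1, e2, ih1]
      by_cases hc : x &&& (1 <<< k0) ≠ 0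
      · simp only [nstep, if_pos hc, if_pos (hcond.mp hc)]
        exact xor_shuffle x y d _
      · simp only [nstep, if_neg hc, if_neg (fun hy => hc (hcond.mpr hy))]
    · intro k hk
      have e1 : nchain ((d, k0) :: t) x = nchain t (nstep d k0 x) := rfl
      have e2 : nchain ((d, k0) :: t) y = nchain t (nstep d k0 y) := rfl
      rw [e1, e2]
      exact ih2 k (hstep k hk)

lemma window_bit (N s k : Nat) (h1 : s ≤ k) (h2 : k < s + 8) :
    (((N >>> s) &&& 255) <<< s).testBit k = N.testBit k := by
  simp only [Nat.testBit_shiftLeft, Nat.testBit_and, Nat.testBit_shiftRight]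
  have h255 : (255 : Nat).testBit (k - s) = true := by
    have e : (255 : Nat) = 2 ^ 8 - 1 := rfl
    rw [e, Nat.testBit_two_pow_sub_one]
    simp only [decide_eq_true_eq]
    omega
  have hks : s + (k - s) = k := by omega
  rw [hks, h255]
  simp [h1]

lemma stage (ps : List (Nat × Nat)) (s N : Nat)
    (hps : ∀ p ∈ ps, s ≤ p.2 ∧ p.2 < s + 8) :
    nchain ps N
      = N ^^^ ((((N >>> s) &&& 255) <<< s) ^^^ nchain ps (((N >>> s) &&& 255) <<< s)) :=
  (nchain_congr ps N _ (fun p hp => (window_bit N s p.2 (hps p hp).1 (hps p hp).2).symm)).1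

-- B's table entries are exactly the XOR masks of A's first byte stage (and, shifted, of the second).
set_option maxRecDepth 10000 in
set_option maxHeartbeats 2000000 in
lemma tfact1 : ∀ b ∈ List.range 256, tableB.getD b 0 = (b <<< 16) ^^^ nchain ps1 (b <<< 16) := by
  decide

set_option maxRecDepth 10000 in
set_option maxHeartbeats 2000000 in
lemma tfact2 : ∀ b ∈ List.range 256, tableB.getD b 0 >>> 8 = (b <<< 8) ^^^ nchain ps2 (b <<< 8) := by
  decide

lemma mkp : mkPairs (List.range 16) 0x988000 = ps1 ++ ps2 := by decide

lemma fold_eq_nchain : ∀ (l : List Nat) (x d : Nat),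
    (l.foldl (fun (s : Nat × Nat) (i : Nat) => (nstep s.2 (23 - i) s.1, s.2 >>> 1)) (x, d)).1
      = nchain (mkPairs l d) x
  | [], _, _ => rfl
  | i :: t, x, d => fold_eq_nchain t (nstep d (23 - i) x) (d >>> 1)

lemma ofNat_eq_zero_iff (n : Nat) : (Int.ofNat n = 0) ↔ n = 0 := by
  rw [show Int.ofNat n = (n : Int) from rfl]
  omega

lemma ofNat_ne_zero_iff (n : Nat) : (Int.ofNat n ≠ 0) ↔ n ≠ 0 :=
  not_congr (ofNat_eq_zero_iff n)

-- A's Int loop on a nonnegative remainder is the Nat chain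
lemma afold_ofNat : ∀ (l : List Nat) (N D : Nat),
    (l.foldl (fun (s : Int × Int) (i : Nat) =>
        (if PySem.Int.band s.1 ((1 : Int) <<< (23 - i)) ≠ 0 then PySem.Int.bxor s.1 s.2 else s.1,
         s.2 >>> (1 : Nat))) (Int.ofNat N, Int.ofNat D)).1
      = Int.ofNat ((l.foldl (fun (s : Nat × Nat) (i : Nat) =>
          (nstep s.2 (23 - i) s.1, s.2 >>> 1)) (N, D)).1)
  | [], _, _ => rfl
  | i :: t, N, D => by
    rw [List.foldl_cons, List.foldl_cons]
    have hhead :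
        ((if PySem.Int.band (Int.ofNat N) ((1 : Int) <<< (23 - i)) ≠ 0
            then PySem.Int.bxor (Int.ofNat N) (Int.ofNat D) else Int.ofNat N,
          (Int.ofNat D) >>> (1 : Nat)) : Int × Int)
          = (Int.ofNat (nstep D (23 - i) N), Int.ofNat (D >>> 1)) := by
      have hsh : (1 : Int) <<< (23 - i) = Int.ofNat (1 <<< (23 - i)) := rfl
      rw [hsh]
      have hband : PySem.Int.band (Int.ofNat N) (Int.ofNat (1 <<< (23 - i)))
          = Int.ofNat (N &&& (1 <<< (23 - i))) := PySem.Int.band_natCast _ _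
      rw [hband]
      have hxor : PySem.Int.bxor (Int.ofNat N) (Int.ofNat D) = Int.ofNat (N ^^^ D) :=
        PySem.Int.bxor_natCast _ _
      by_cases hc : N &&& (1 <<< (23 - i)) ≠ 0
      · rw [if_pos ((ofNat_ne_zero_iff _).mpr hc), hxor]
        simp only [nstep, if_pos hc]
        rfl
      · rw [if_neg (fun h => hc ((ofNat_ne_zero_iff _).mp h))]
        simp only [nstep, if_neg hc]
        rfl
    rw [hhead]
    exact afold_ofNat t (nstep D (23 - i) N) (D >>> 1)

lemma bxor_negSucc_ofNat (K D : Nat) :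
    PySem.Int.bxor (Int.negSucc K) (Int.ofNat D) = Int.negSucc (K ^^^ D) := by
  unfold PySem.Int.bxor
  have hneg : ¬ (0 : Int) ≤ Int.negSucc K := by
    rw [Int.not_le]; exact Int.negSucc_lt_zero K
  rw [if_neg hneg, if_pos (by exact Int.natCast_nonneg D)]
  have hK : (-Int.negSucc K - 1) = (K : Int) := by rw [Int.negSucc_eq]; ring
  rw [hK]
  have : ((K : Int)).toNat = K := Int.toNat_natCast K
  rw [this]
  have : ((Int.ofNat D)).toNat = D := rfl
  rw [this, Int.negSucc_eq]
  ring

-- A's Int loop on a negative remainder stays negative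
lemma afold_negSucc : ∀ (l : List Nat) (K D : Nat),
    ∃ K', (l.foldl (fun (s : Int × Int) (i : Nat) =>
        (if PySem.Int.band s.1 ((1 : Int) <<< (23 - i)) ≠ 0 then PySem.Int.bxor s.1 s.2 else s.1,
         s.2 >>> (1 : Nat))) (Int.negSucc K, Int.ofNat D)).1 = Int.negSucc K'
  | [], K, _ => ⟨K, rfl⟩
  | i :: t, K, D => by
    rw [List.foldl_cons]
    by_cases hc : PySem.Int.band (Int.negSucc K) ((1 : Int) <<< (23 - i)) ≠ 0
    · have hhead :
          ((if PySem.Int.band (Int.negSucc K) ((1 : Int) <<< (23 - i)) ≠ 0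
              then PySem.Int.bxor (Int.negSucc K) (Int.ofNat D) else Int.negSucc K,
            (Int.ofNat D) >>> (1 : Nat)) : Int × Int)
            = (Int.negSucc (K ^^^ D), Int.ofNat (D >>> 1)) := by
        rw [if_pos hc, bxor_negSucc_ofNat]; rfl
      rw [hhead]
      exact afold_negSucc t (K ^^^ D) (D >>> 1)
    · have hhead :
          ((if PySem.Int.band (Int.negSucc K) ((1 : Int) <<< (23 - i)) ≠ 0
              then PySem.Int.bxor (Int.negSucc K) (Int.ofNat D) else Int.negSucc K,
            (Int.ofNat D) >>> (1 : Nat)) : Int × Int)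
            = (Int.negSucc K, Int.ofNat (D >>> 1)) := by
        rw [if_neg hc]; rfl
      rw [hhead]
      exact afold_negSucc t K (D >>> 1)

-- the Nat-level heart: A's 16-step chain = B's two table reductions
lemma nat_main (N : Nat) :
    nchain (ps1 ++ ps2) N
      = (N ^^^ tableB.getD ((N >>> 16) &&& 255) 0) ^^^
          (tableB.getD (((N ^^^ tableB.getD ((N >>> 16) &&& 255) 0) >>> 8) &&& 255) 0 >>> 8) := by
  have hb1 : (N >>> 16) &&& 255 ∈ List.range 256 := by
    simp only [List.mem_range]
    exact Nat.lt_succ_of_le Nat.and_le_right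
  have happ : nchain (ps1 ++ ps2) N = nchain ps2 (nchain ps1 N) := by
    unfold nchain
    rw [List.foldl_append]
  have hs1 := stage ps1 16 N (by decide)
  have ht1 := tfact1 _ hb1
  have hs1' : nchain ps1 N = N ^^^ tableB.getD ((N >>> 16) &&& 255) 0 := by
    rw [hs1, ht1]
  set m1 := N ^^^ tableB.getD ((N >>> 16) &&& 255) 0 with hm1
  have hb2 : (m1 >>> 8) &&& 255 ∈ List.range 256 := by
    simp only [List.mem_range]
    exact Nat.lt_succ_of_le Nat.and_le_right
  have hs2 := stage ps2 8 m1 (by decide)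
  have ht2 := tfact2 _ hb2
  rw [happ, hs1', hs2, ← ht2]

-- pointwise bridges from the Int ports to Nat for a nonnegative remainder
lemma toNat_ofNat' (n : Nat) : (Int.ofNat n).toNat = n := rfl

lemma alt1 (N : Nat) :
    PySem.Int.bxor (Int.ofNat N)
        (Int.ofNat (tableB.getD (PySem.Int.band ((Int.ofNat N) >>> (16 : Nat)) 255).toNat 0))
      = Int.ofNat (N ^^^ tableB.getD ((N >>> 16) &&& 255) 0) := by
  have h1 : PySem.Int.band (Int.ofNat (N >>> 16)) (Int.ofNat 255)
      = Int.ofNat ((N >>> 16) &&& 255) := PySem.Int.band_natCast _ _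
  rw [show (Int.ofNat N) >>> (16 : Nat) = Int.ofNat (N >>> 16) from rfl,
    show (255 : Int) = Int.ofNat 255 from rfl, h1, toNat_ofNat']
  exact PySem.Int.bxor_natCast _ _

lemma alt2 (M : Nat) :
    PySem.Int.bxor (Int.ofNat M)
        (Int.ofNat (tableB.getD (PySem.Int.band ((Int.ofNat M) >>> (8 : Nat)) 255).toNat 0 >>> 8))
      = Int.ofNat (M ^^^ (tableB.getD ((M >>> 8) &&& 255) 0 >>> 8)) := by
  have h1 : PySem.Int.band (Int.ofNat (M >>> 8)) (Int.ofNat 255)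
      = Int.ofNat ((M >>> 8) &&& 255) := PySem.Int.band_natCast _ _
  rw [show (Int.ofNat M) >>> (8 : Nat) = Int.ofNat (M >>> 8) from rfl,
    show (255 : Int) = Int.ofNat 255 from rfl, h1, toNat_ofNat']
  exact PySem.Int.bxor_natCast _ _

-- ===== VERDICT (by name: the statement is the Claim_ definition above) =====
theorem crc8check_spec : Claim_equal_crc8check := by
  intro value _hdom _hpre
  unfold Spec_crc8check
  unfold crc8check crc8check_alt
  dsimp only
  generalize (PySem.Int.bor
      ((((PySem.List.pyGet? value 0).getD 0 <<< (8 : Nat)) + (PySem.List.pyGet? value 1).getD 0)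
        <<< (8 : Nat)) ((PySem.List.pyGet? value 2).getD 0)) = r
  have h988 : (0x988000 : Int) = Int.ofNat 0x988000 := rfl
  cases r with
  | ofNat N =>
    rw [h988, afold_ofNat, fold_eq_nchain, mkp, nat_main, alt1, alt2]
    by_cases hz : ((N ^^^ tableB.getD ((N >>> 16) &&& 255) 0) ^^^
        (tableB.getD (((N ^^^ tableB.getD ((N >>> 16) &&& 255) 0) >>> 8) &&& 255) 0 >>> 8)) = 0
    · rw [hz]; rfl
    · rw [if_neg (fun h => hz ((ofNat_eq_zero_iff _).mp h))]
      have hb : (Int.ofNat ((N ^^^ tableB.getD ((N >>> 16) &&& 255) 0) ^^^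
          (tableB.getD (((N ^^^ tableB.getD ((N >>> 16) &&& 255) 0) >>> 8) &&& 255) 0 >>> 8)) == 0)
          = false := by
        simp only [beq_eq_false_iff_ne, ne_eq]
        intro h; exact hz ((ofNat_eq_zero_iff _).mp h)
      rw [hb]
  | negSucc K =>
    rw [h988]
    obtain ⟨K', hK'⟩ := afold_negSucc (List.range 16) K 0x988000
    rw [hK']
    rw [bxor_negSucc_ofNat, bxor_negSucc_ofNat]
    simp
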